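-- pv_equiv track=rewrite | github.com/Zhennan-Wu/AISPFS | src/spudd_parser.py | _recover_reward_dependence
-- ===== SOURCE A (Python) =====
-- import copy
--
-- def _recover_reward_dependence(vars, val_dict):
--     '''
--     generate a list of state space that satisfies the "val_dict" information
--     '''
--     full_s_lst = ['']
--     for var in vars:
--         if (var in val_dict.keys()):
--             if (val_dict[var] != '2'):
--                 for idx, _ in enumerate(full_s_lst):
--                     full_s_lst[idx] = full_s_lst[idx] + val_dict[var]
--             else:
--                 temp_lst = copy.deepcopy(full_s_lst)
--                 for idx, _ in enumerate(temp_lst):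
--                     temp_lst[idx] = temp_lst[idx] + '0'
--                 for idx, _ in enumerate(full_s_lst):
--                     full_s_lst[idx] = full_s_lst[idx] + '1'
--                 full_s_lst = temp_lst + full_s_lst
--         else:
--             temp_lst = copy.deepcopy(full_s_lst)
--             for idx, _ in enumerate(temp_lst):
--                 temp_lst[idx] = temp_lst[idx] + '0'
--             for idx, _ in enumerate(full_s_lst):
--                 full_s_lst[idx] = full_s_lst[idx] + '1'
--             full_s_lst = temp_lst + full_s_lst
--     return full_s_lst
-- ===== SOURCE B (Python) =====
-- import itertools
--
-- def _recover_reward_dependence(var_list, val_dict):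
--     '''
--     generate a list of state space that satisfies the "val_dict" information
--     '''
--     options = [[val_dict[v]] if v in val_dict and val_dict[v] != '2' else ['0', '1']
--                for v in var_list]
--     return [''.join(reversed(choice)) for choice in itertools.product(*reversed(options))]
-- ===== Notes on version B (the rewrite author's own statement) =====
-- stated objective: idiomatic
-- what changed: B precomputes the per-variable option lists in one pass and enumerates the whole state space with a single itertools.product call (reversed so the last variable varies slowest, matching A's order), instead of A's incremental list-doubling with deepcopy and in-place index loops per variable.
import Mathlib
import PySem

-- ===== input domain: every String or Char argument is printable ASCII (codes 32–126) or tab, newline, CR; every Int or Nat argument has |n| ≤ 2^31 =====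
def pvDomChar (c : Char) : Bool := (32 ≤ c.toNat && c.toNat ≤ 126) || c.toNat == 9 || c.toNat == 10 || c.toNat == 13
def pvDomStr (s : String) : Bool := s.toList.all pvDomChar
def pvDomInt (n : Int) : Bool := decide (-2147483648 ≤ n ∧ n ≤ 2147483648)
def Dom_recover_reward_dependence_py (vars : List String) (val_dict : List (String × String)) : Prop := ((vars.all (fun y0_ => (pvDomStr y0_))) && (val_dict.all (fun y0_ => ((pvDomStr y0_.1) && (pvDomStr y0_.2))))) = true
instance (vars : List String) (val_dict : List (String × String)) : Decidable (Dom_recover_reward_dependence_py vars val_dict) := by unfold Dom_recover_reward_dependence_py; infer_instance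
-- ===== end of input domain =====

-- B enumerates the state space with one cartesian-product pass over precomputed
-- per-variable option lists instead of A's incremental list-doubling; equivalence proved below.
-- ===== PORT A =====
def recover_reward_dependence_py (vars : List String) (val_dict : List (String × String)) : List String :=
  let d := PySem.Dict.ofList val_dict
  vars.foldl (fun full_s_lst var =>
    if PySem.Dict.contains d var then
      if PySem.Dict.getD d var "" ≠ "2" then
        full_s_lst.map (fun s => s ++ PySem.Dict.getD d var "")
      else
        full_s_lst.map (fun s => s ++ "0") ++ full_s_lst.map (fun s => s ++ "1")
    else
      full_s_lst.map (fun s => s ++ "0") ++ full_s_lst.map (fun s => s ++ "1")) [""]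

-- ===== PORT B =====
-- itertools.product (last factor varies fastest), as used by Source B
def pvProduct : List (List String) → List (List String)
  | [] => [[]]
  | o :: rest => o.flatMap (fun x => (pvProduct rest).map (fun c => x :: c))

def recover_reward_dependence_py_alt (vars : List String) (val_dict : List (String × String)) : List String :=
  let d := PySem.Dict.ofList val_dict
  let options := vars.map (fun var =>
    if PySem.Dict.contains d var && (PySem.Dict.getD d var "" != "2") then
      [PySem.Dict.getD d var ""]
    else ["0", "1"])
  (pvProduct options.reverse).map (fun choice => PySem.Str.join "" choice.reverse)

-- ===== PRECONDITION & SPEC =====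
def Spec_recover_reward_dependence_py (vars : List String) (val_dict : List (String × String)) (out : List String) : Prop := out = recover_reward_dependence_py_alt vars val_dict
instance (vars : List String) (val_dict : List (String × String)) (out : List String) : Decidable (Spec_recover_reward_dependence_py vars val_dict out) := by unfold Spec_recover_reward_dependence_py; infer_instance

-- ===== CLAIM (what is proved, stated in full; the proofs are below) =====
def Claim_equal_recover_reward_dependence_py : Prop := ∀ (vars : List String) (val_dict : List (String × String)), Dom_recover_reward_dependence_py vars val_dict → Spec_recover_reward_dependence_py vars val_dict (recover_reward_dependence_py vars val_dict)

-- ===== LEMMAS AND PROOFS =====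

theorem pv_join_nil : PySem.Str.join "" ([] : List String) = "" := by
  simp [PySem.Str.join, PySem.Chars.join, List.intercalate]

theorem pv_join_cons (x : String) (l : List String) :
    PySem.Str.join "" (x :: l) = x ++ PySem.Str.join "" l := by
  apply String.toList_inj.mp
  cases l <;> simp [PySem.Str.join, PySem.Chars.join, List.intercalate]

-- the options B computes for one variable
def pvOpts (d : PySem.Dict String String) (var : String) : List String :=
  if PySem.Dict.contains d var && (PySem.Dict.getD d var "" != "2") then
    [PySem.Dict.getD d var ""]
  else ["0", "1"]

-- A's loop body equals "append each option of the variable"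
theorem pv_step (d : PySem.Dict String String) (L : List String) (var : String) :
    (if PySem.Dict.contains d var then
      if PySem.Dict.getD d var "" ≠ "2" then
        L.map (fun s => s ++ PySem.Dict.getD d var "")
      else
        L.map (fun s => s ++ "0") ++ L.map (fun s => s ++ "1")
    else
      L.map (fun s => s ++ "0") ++ L.map (fun s => s ++ "1"))
    = (pvOpts d var).flatMap (fun x => L.map (fun s => s ++ x)) := by
  unfold pvOpts
  by_cases hc : PySem.Dict.contains d var
  · by_cases hv : PySem.Dict.getD d var "" = "2" <;> simp [hc, hv, List.flatMap]
  · simp [hc, List.flatMap]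

theorem pv_flatten_map_singleton {α β : Type} (f : α → β) (l : List α) :
    (l.map (fun c => [f c])).flatten = l.map f := by
  induction l <;> simp_all

theorem pv_product_append_singleton (A : List (List String)) (o : List String) :
    pvProduct (A ++ [o]) = (pvProduct A).flatMap (fun c => o.map (fun x => c ++ [x])) := by
  induction A with
  | nil => simp [pvProduct, List.flatMap, pv_flatten_map_singleton]
  | cons a A ih =>
      simp only [List.cons_append, pvProduct, ih, List.flatMap_assoc, List.map_flatMap,
        List.flatMap_map, List.map_map]
      rfl

theorem pv_main (d : PySem.Dict String String) (vars : List String) (L : List String) :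
    vars.foldl (fun full_s_lst var =>
      if PySem.Dict.contains d var then
        if PySem.Dict.getD d var "" ≠ "2" then
          full_s_lst.map (fun s => s ++ PySem.Dict.getD d var "")
        else
          full_s_lst.map (fun s => s ++ "0") ++ full_s_lst.map (fun s => s ++ "1")
      else
        full_s_lst.map (fun s => s ++ "0") ++ full_s_lst.map (fun s => s ++ "1")) L
    = (pvProduct ((vars.map (pvOpts d)).reverse)).flatMap
        (fun c => L.map (fun s => s ++ PySem.Str.join "" c.reverse)) := by
  induction vars generalizing L with
  | nil => simp [pvProduct, pv_join_nil, List.flatMap]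
  | cons v rest ih =>
      rw [List.foldl_cons, ih, pv_step]
      rw [List.map_cons, List.reverse_cons, pv_product_append_singleton]
      rw [List.flatMap_assoc]
      apply List.flatMap_congr
      intro c _
      rw [List.flatMap_map, List.map_flatMap]
      apply List.flatMap_congr
      intro x _
      rw [List.map_map]
      apply List.map_congr_left
      intro s _
      simp only [Function.comp_apply, List.reverse_append, List.reverse_cons,
        List.reverse_nil, List.nil_append, List.cons_append, pv_join_cons,
        String.append_assoc]

-- ===== VERDICT (by name: the statement is the Claim_ definition above) =====
theorem recover_reward_dependence_py_spec : Claim_equal_recover_reward_dependence_py := by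
  intro vars val_dict _
  unfold Spec_recover_reward_dependence_py recover_reward_dependence_py recover_reward_dependence_py_alt
  rw [pv_main]
  have : (vars.map (pvOpts (PySem.Dict.ofList val_dict))) = vars.map (fun var =>
      if PySem.Dict.contains (PySem.Dict.ofList val_dict) var &&
          (PySem.Dict.getD (PySem.Dict.ofList val_dict) var "" != "2") then
        [PySem.Dict.getD (PySem.Dict.ofList val_dict) var ""]
      else ["0", "1"]) := by
    apply List.map_congr_left; intro v _; rfl
  rw [this]
  simp only [List.flatMap, List.map_cons, List.map_nil, pv_flatten_map_singleton]
  apply List.map_congr_left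
  intro c _
  simp [String.empty_append]
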